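-- pv_equiv track=rewrite | github.com/LeoGardner12/soundtrackable_track_upload_automation | wav_to_website.py | add_watermark_aws_urls
-- ===== SOURCE A (Python) =====
-- def add_watermark_aws_urls(product_variation_list, url_list):
-- 	for list_of_products_and_variations in product_variation_list:
-- 		for product_or_variation in list_of_products_and_variations:
-- 			for url in url_list:
-- 				if product_or_variation[0] == "Product":
-- 					if url[0].split(" - ")[0] == product_or_variation[1]["name"]:
-- 						product_or_variation[1]["watermark_url"] = url[1]
--
-- 	return product_variation_list
-- ===== SOURCE B (Python) =====
-- def _last_match(name, url_list):
-- 	# first match in reversed order = last matching url overall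
-- 	for full, link in reversed(url_list):
-- 		if full.split(" - ")[0] == name:
-- 			return link
-- 	return None
--
-- def add_watermark_aws_urls(product_variation_list, url_list):
-- 	if url_list:
-- 		for group in product_variation_list:
-- 			for entry in group:
-- 				if entry[0] == "Product":
-- 					link = _last_match(entry[1]["name"], url_list)
-- 					if link is not None:
-- 						entry[1]["watermark_url"] = link
-- 	return product_variation_list
-- ===== Notes on version B (the rewrite author's own statement) =====
-- stated objective: alternative
-- what changed: A scans the whole url_list forward for every product entry, rewriting the entry dict once per matching url; B does one backward search of url_list per Product entry (first match in reversed order = last match overall, stopping at the first hit) and performs at most one dict write per entry.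
import Mathlib
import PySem

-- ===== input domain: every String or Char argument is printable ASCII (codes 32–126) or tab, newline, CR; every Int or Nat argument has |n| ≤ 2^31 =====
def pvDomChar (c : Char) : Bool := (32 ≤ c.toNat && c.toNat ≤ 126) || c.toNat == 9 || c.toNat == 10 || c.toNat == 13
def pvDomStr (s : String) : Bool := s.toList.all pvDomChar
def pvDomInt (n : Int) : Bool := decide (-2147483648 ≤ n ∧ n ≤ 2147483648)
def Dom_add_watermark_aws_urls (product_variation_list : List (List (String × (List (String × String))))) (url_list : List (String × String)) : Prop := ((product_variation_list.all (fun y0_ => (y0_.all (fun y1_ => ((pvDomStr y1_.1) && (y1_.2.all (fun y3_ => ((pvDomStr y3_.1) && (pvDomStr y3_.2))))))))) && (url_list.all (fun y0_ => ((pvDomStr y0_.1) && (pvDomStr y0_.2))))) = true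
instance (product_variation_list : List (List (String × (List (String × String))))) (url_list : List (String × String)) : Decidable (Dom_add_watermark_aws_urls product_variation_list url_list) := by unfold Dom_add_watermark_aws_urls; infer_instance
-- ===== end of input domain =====

-- B replaces A's forward rescans of url_list (one dict rewrite per matching url) by one backward
-- search per Product entry (last match wins) and at most one dict write per entry; equivalence is
-- about the RETURN value only (both Pythons mutate the entry dicts in place).

-- ===== PORT A =====

-- url[0].split(" - ")[0]  (split with the non-empty separator " - " is some and never empty)
def pvPrefixOf (s : String) : String := ((PySem.Str.split? s " - ").getD []).headD ""

-- literal port of A's triple loop: for each entry, fold over url_list mutating the entry's dict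
def add_watermark_aws_urls (product_variation_list : List (List (String × (List (String × String))))) (url_list : List (String × String)) : List (List (String × (List (String × String)))) :=
  product_variation_list.map (fun list_of_products_and_variations =>
    list_of_products_and_variations.map (fun product_or_variation =>
      url_list.foldl (fun e url =>
        if e.1 == "Product" then
          match (PySem.Dict.mk e.2).get? "name" with
          | some nm =>            -- none = KeyError, excluded by Pre_
            if pvPrefixOf url.1 == nm then
              (e.1, ((PySem.Dict.mk e.2).insert "watermark_url" url.2).items)
            else e
          | none => e
        else e) product_or_variation))

-- ===== PORT B =====

-- _last_match's loop over reversed(url_list): first match in the given list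
def pvLastMatch (name : String) : List (String × String) → Option String
  | [] => none
  | u :: rest => if pvPrefixOf u.1 == name then some u.2 else pvLastMatch name rest

-- body of B's inner loop: one backward search, at most one write
def pvMarkEntry (urls : List (String × String)) (entry : String × List (String × String)) : String × List (String × String) :=
  if entry.1 == "Product" then
    match (PySem.Dict.mk entry.2).get? "name" with
    | some nm =>                  -- none = KeyError, excluded by Pre_
      match pvLastMatch nm urls.reverse with
      | some link => (entry.1, ((PySem.Dict.mk entry.2).insert "watermark_url" link).items)
      | none => entry
    | none => entry
  else entry

def pvMarkEntries (urls : List (String × String)) : List (String × List (String × String)) → List (String × List (String × String))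
  | [] => []
  | e :: es => pvMarkEntry urls e :: pvMarkEntries urls es

def pvMarkGroups (urls : List (String × String)) : List (List (String × (List (String × String)))) → List (List (String × (List (String × String))))
  | [] => []
  | g :: gs => pvMarkEntries urls g :: pvMarkGroups urls gs

def add_watermark_aws_urls_alt (product_variation_list : List (List (String × (List (String × String))))) (url_list : List (String × String)) : List (List (String × (List (String × String)))) :=
  if url_list.isEmpty then product_variation_list
  else pvMarkGroups url_list product_variation_list

-- ===== PRECONDITION & SPEC =====
-- Pre_ excludes exactly the inputs where A raises KeyError: a non-empty url_list together with
-- some "Product" entry whose dict has no "name" key (B raises there too).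
def Pre_add_watermark_aws_urls (product_variation_list : List (List (String × (List (String × String))))) (url_list : List (String × String)) : Prop :=
  url_list = [] ∨ ∀ group ∈ product_variation_list, ∀ entry ∈ group,
    entry.1 = "Product" → ((PySem.Dict.mk entry.2).get? "name").isSome
instance (product_variation_list : List (List (String × (List (String × String))))) (url_list : List (String × String)) : Decidable (Pre_add_watermark_aws_urls product_variation_list url_list) := by unfold Pre_add_watermark_aws_urls; infer_instance

def pvWitness_add_watermark_aws_urls : (List (List (String × (List (String × String))))) × (List (String × String)) :=
  ([[("Product", [("name", "Song")]), ("Variation", [])]], [("Song - wav", "http://u")])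

def Spec_add_watermark_aws_urls (product_variation_list : List (List (String × (List (String × String))))) (url_list : List (String × String)) (out : List (List (String × (List (String × String))))) : Prop := out = add_watermark_aws_urls_alt product_variation_list url_list
instance (product_variation_list : List (List (String × (List (String × String))))) (url_list : List (String × String)) (out : List (List (String × (List (String × String))))) : Decidable (Spec_add_watermark_aws_urls product_variation_list url_list out) := by unfold Spec_add_watermark_aws_urls; infer_instance

-- ===== CLAIM (what is proved, stated in full; the proofs are below) =====
def Claim_equal_add_watermark_aws_urls : Prop := ∀ (product_variation_list : List (List (String × (List (String × String))))) (url_list : List (String × String)), Dom_add_watermark_aws_urls product_variation_list url_list → Pre_add_watermark_aws_urls product_variation_list url_list → Spec_add_watermark_aws_urls product_variation_list url_list (add_watermark_aws_urls product_variation_list url_list)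

-- ===== LEMMAS AND PROOFS =====

-- the state of A's inner url-loop for one "Product" entry with dict d:
-- either untouched, or with "watermark_url" set to the last matching url so far
def pvState (d : List (String × String)) (o : Option String) : String × List (String × String) :=
  ("Product", match o with
    | some u => ((PySem.Dict.mk d).insert "watermark_url" u).items
    | none => d)

-- appending one url to the searched (reversed) list
lemma pvLastMatch_append (nm : String) (xs : List (String × String)) (u : String × String) :
    pvLastMatch nm (xs ++ [u])
      = (pvLastMatch nm xs).orElse (fun _ => if pvPrefixOf u.1 == nm then some u.2 else none) := by
  induction xs with
  | nil =>
    by_cases h : pvPrefixOf u.1 = nm <;> simp [pvLastMatch, h, Option.orElse]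
  | cons x xs ih =>
    by_cases h : pvPrefixOf x.1 = nm <;> simp [pvLastMatch, h, ih, Option.orElse]

-- B's backward search = A's forward "last match wins" fold over the urls
lemma pvLastMatch_reverse (nm : String) (urls : List (String × String)) (o : Option String) :
    ((pvLastMatch nm urls.reverse).orElse (fun _ => o))
      = urls.foldl (fun o url => if pvPrefixOf url.1 == nm then some url.2 else o) o := by
  induction urls generalizing o with
  | nil => simp [pvLastMatch, Option.orElse]
  | cons u us ih =>
    simp only [List.reverse_cons, List.foldl_cons]
    rw [pvLastMatch_append, ← ih]
    cases pvLastMatch nm us.reverse with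
    | some v => simp [Option.orElse]
    | none =>
      by_cases h : pvPrefixOf u.1 = nm <;> simp [h, Option.orElse]

-- A's url fold on a "Product" entry, tracked through pvState
lemma pv_foldA (urls : List (String × String)) (d : List (String × String)) (nm : String)
    (hn : (PySem.Dict.mk d).get? "name" = some nm) (o : Option String) :
    urls.foldl (fun e url =>
        if e.1 == "Product" then
          match (PySem.Dict.mk e.2).get? "name" with
          | some nm' => if pvPrefixOf url.1 == nm' then
              (e.1, ((PySem.Dict.mk e.2).insert "watermark_url" url.2).items) else e
          | none => e
        else e) (pvState d o)
      = pvState d (urls.foldl (fun o url => if pvPrefixOf url.1 == nm then some url.2 else o) o) := by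
  induction urls generalizing o with
  | nil => rfl
  | cons u us ih =>
    simp only [List.foldl_cons]
    have hstep : (if (pvState d o).1 == "Product" then
          match (PySem.Dict.mk (pvState d o).2).get? "name" with
          | some nm' => if pvPrefixOf u.1 == nm' then
              ((pvState d o).1, ((PySem.Dict.mk (pvState d o).2).insert "watermark_url" u.2).items) else pvState d o
          | none => pvState d o
        else pvState d o)
        = pvState d (if pvPrefixOf u.1 == nm then some u.2 else o) := by
      cases o with
      | none =>
        by_cases hm : pvPrefixOf u.1 = nm <;> simp [pvState, hn, hm]
      | some w =>
        have hmk : PySem.Dict.mk (((PySem.Dict.mk d).insert "watermark_url" w).items)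
            = (PySem.Dict.mk d).insert "watermark_url" w := rfl
        have hname : (PySem.Dict.mk (((PySem.Dict.mk d).insert "watermark_url" w).items)).get? "name"
            = some nm := by
          rw [hmk, PySem.Dict.get?_insert_of_ne _ _ (by decide), hn]
        by_cases hm : pvPrefixOf u.1 = nm <;>
          simp [pvState, hname, hm, hmk, PySem.Dict.insert_insert_self]
    rw [hstep, ih]

-- A's url fold leaves a non-"Product" entry unchanged
lemma pv_foldA_notProduct (urls : List (String × String)) (e : String × List (String × String))
    (h : ¬ e.1 = "Product") :
    urls.foldl (fun e url =>
        if e.1 == "Product" then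
          match (PySem.Dict.mk e.2).get? "name" with
          | some nm' => if pvPrefixOf url.1 == nm' then
              (e.1, ((PySem.Dict.mk e.2).insert "watermark_url" url.2).items) else e
          | none => e
        else e) e = e := by
  induction urls with
  | nil => rfl
  | cons u us ih =>
    simp only [List.foldl_cons]
    have hstep : (if e.1 == "Product" then
          match (PySem.Dict.mk e.2).get? "name" with
          | some nm' => if pvPrefixOf u.1 == nm' then
              (e.1, ((PySem.Dict.mk e.2).insert "watermark_url" u.2).items) else e
          | none => e
        else e) = e := by simp [h]
    rw [hstep, ih]

-- B's recursions are maps of their step functions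
lemma pvMarkEntries_eq_map (urls : List (String × String)) (l : List (String × List (String × String))) :
    pvMarkEntries urls l = l.map (pvMarkEntry urls) := by
  induction l with
  | nil => rfl
  | cons e es ih => simp [pvMarkEntries, ih]

lemma pvMarkGroups_eq_map (urls : List (String × String)) (l : List (List (String × (List (String × String))))) :
    pvMarkGroups urls l = l.map (pvMarkEntries urls) := by
  induction l with
  | nil => rfl
  | cons g gs ih => simp [pvMarkGroups, ih]

-- ===== VERDICT (by name: the statement is the Claim_ definition above) =====
theorem add_watermark_aws_urls_spec : Claim_equal_add_watermark_aws_urls := by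
  intro pvl urls _dom hpre
  unfold Spec_add_watermark_aws_urls add_watermark_aws_urls add_watermark_aws_urls_alt
  by_cases hnil : urls = []
  · subst hnil; simp
  · rw [if_neg (by simpa [List.isEmpty_iff] using hnil)]
    have hpre' := hpre.resolve_left hnil
    rw [pvMarkGroups_eq_map]
    apply List.map_congr_left
    intro group hg
    rw [pvMarkEntries_eq_map]
    apply List.map_congr_left
    intro entry he
    obtain ⟨tag, d⟩ := entry
    by_cases hp : tag = "Product"
    · subst hp
      cases hn : (PySem.Dict.mk d).get? "name" with
      | none =>
        have h2 := hpre' group hg _ he rfl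
        rw [hn] at h2; simp at h2
      | some nm =>
        have h0 : (("Product", d) : String × List (String × String)) = pvState d none := rfl
        conv_lhs => rw [h0, pv_foldA urls d nm hn none]
        have hlast : (pvLastMatch nm urls.reverse)
            = urls.foldl (fun o url => if pvPrefixOf url.1 == nm then some url.2 else o) none := by
          rw [← pvLastMatch_reverse nm urls none]
          cases pvLastMatch nm urls.reverse <;> simp [Option.orElse]
        cases hres : urls.foldl (fun o url => if pvPrefixOf url.1 == nm then some url.2 else o) none with
        | none =>
          rw [hres] at hlast
          simp [pvState, pvMarkEntry, hn, hlast]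
        | some v =>
          rw [hres] at hlast
          simp [pvState, pvMarkEntry, hn, hlast]
    · rw [pv_foldA_notProduct urls (tag, d) hp]
      simp [pvMarkEntry, hp]
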